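-- pv_equiv track=rewrite | github.com/iwootten/adventofcode | 2018/day8/step1.py | process_tree
-- ===== SOURCE A (Python) =====
-- def read_header(data):
--     return int(data[0]), int(data[1]), data[2:]
--
-- def read_metadata(data, length):
--     return data[-length:], data[0:-length]
--
-- def process_tree(tree, metadata):
--     if tree:
--         # Read header from left of tree
--         children_count, metadata_count, header_tree = read_header(tree)
--
--         if children_count == 0:
--             new_metadata = header_tree[0:metadata_count]
--             to_process = header_tree[metadata_count:]
--         if children_count == 1:
--             # Read metadata from right of tree
--             new_metadata, to_process = read_metadata(header_tree, metadata_count)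
--
--         metadata.append(new_metadata)
--
--         process_tree(to_process, metadata)
--
--     return metadata
-- ===== SOURCE B (Python) =====
-- def process_tree(tree, metadata):
--     # Iterative version: walk the flat list with a while loop, peeling one node
--     # per step.  Appends to `metadata` in place, like the recursive original.
--     rest = tree
--     while rest:
--         children_count, metadata_count = int(rest[0]), int(rest[1])
--         body = rest[2:]
--         if children_count == 0:
--             metadata.append(body[:metadata_count])
--             rest = body[metadata_count:]
--         elif children_count == 1:
--             metadata.append(body[-metadata_count:])
--             rest = body[:-metadata_count]
--         else:
--             raise ValueError("node with more than one child")
--     return metadata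
-- ===== Notes on version B (the rewrite author's own statement) =====
-- stated objective: simpler
-- what changed: A peels nodes by recursion through two helper functions (read_header/read_metadata); B is a single iterative while loop over the shrinking list with the header read and slices inlined, no helpers and no recursion.
import Mathlib
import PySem

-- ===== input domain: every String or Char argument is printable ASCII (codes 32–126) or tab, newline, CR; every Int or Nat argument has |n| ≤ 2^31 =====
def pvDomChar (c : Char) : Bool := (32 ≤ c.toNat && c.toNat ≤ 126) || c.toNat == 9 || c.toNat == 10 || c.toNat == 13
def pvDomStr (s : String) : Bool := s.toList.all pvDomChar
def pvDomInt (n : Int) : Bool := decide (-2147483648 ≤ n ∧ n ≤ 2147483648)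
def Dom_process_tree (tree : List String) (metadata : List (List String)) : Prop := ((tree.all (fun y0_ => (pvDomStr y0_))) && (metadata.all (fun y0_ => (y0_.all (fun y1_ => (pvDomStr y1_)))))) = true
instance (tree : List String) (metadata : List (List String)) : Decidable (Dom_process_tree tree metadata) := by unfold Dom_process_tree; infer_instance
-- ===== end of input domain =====

-- B replaces A's recursion-with-helper-functions by a single iterative while loop over the
-- shrinking list (objective: simpler). Both A and B append to the caller's `metadata` list in
-- place in Python; the theorems below are about the returned value (that same list).

-- ===== PORT A =====

-- used by process_tree's decreasing_by: a [:b] slice is no longer than its list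
theorem pv_slice_none_some_len_le (xs : List String) (b : Int) :
    (PySem.List.slice xs none (some b)).length ≤ xs.length := by
  rw [← PySem.List.slice_zero_start (xs := xs) (b? := some b), PySem.List.length_slice]
  have h1 := PySem.List.clampIdx_le xs.length b
  omega

def read_header (data : List String) : Option (Int × Int × List String) :=
  -- int(data[0]), int(data[1]), data[2:]  (none = the Python raises)
  match PySem.List.pyGet? data 0, PySem.List.pyGet? data 1 with
  | some a, some b =>
    match PySem.Int.ofStr? a, PySem.Int.ofStr? b with
    | some x, some y => some (x, y, PySem.List.slice data (some 2) none)
    | _, _ => none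
  | _, _ => none

def read_metadata (data : List String) (length : Int) : List String × List String :=
  (PySem.List.slice data (some (-length)) none, PySem.List.slice data (some 0) (some (-length)))

theorem read_header_some {data : List String} {c m : Int} {ht : List String}
    (h : read_header data = some (c, m, ht)) : ht = data.drop 2 := by
  unfold read_header at h
  split at h
  · split at h
    · simp only [Option.some.injEq, Prod.mk.injEq] at h
      rw [← h.2.2, PySem.List.slice_from data (by norm_num : (0:Int) ≤ 2)]
      rfl
    · exact absurd h (by simp)
  · exact absurd h (by simp)

def process_tree (tree : List String) (metadata : List (List String)) : List (List String) :=
  if tree = [] then metadata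
  else
    match hrh : read_header tree with
    | none => metadata  -- Python raises here (IndexError / ValueError); outside Pre_
    | some (children_count, metadata_count, header_tree) =>
      if children_count = 0 then
        let new_metadata := PySem.List.slice header_tree (some 0) (some metadata_count)
        let to_process := PySem.List.slice header_tree (some metadata_count) none
        process_tree to_process (metadata ++ [new_metadata])
      else if children_count = 1 then
        let p := read_metadata header_tree metadata_count
        process_tree p.2 (metadata ++ [p.1])
      else metadata  -- Python raises UnboundLocalError; outside Pre_
termination_by tree.length
decreasing_by
  · have hht := read_header_some hrh
    have h1 : 0 < tree.length := List.length_pos_of_ne_nil (by assumption)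
    rw [PySem.List.slice_some_none]
    have := List.length_drop (l := header_tree) (i := PySem.List.clampIdx header_tree.length metadata_count)
    have h2 : header_tree.length = tree.length - 2 := by rw [hht]; simp
    omega
  · have hht := read_header_some hrh
    have h1 : 0 < tree.length := List.length_pos_of_ne_nil (by assumption)
    have h2 : header_tree.length = tree.length - 2 := by rw [hht]; simp
    unfold read_metadata
    simp only [PySem.List.slice_zero_start]
    have := pv_slice_none_some_len_le header_tree (-metadata_count)
    omega

-- ===== PORT B =====

-- the while loop of Source B; `fuel` only makes the recursion total (every iteration drops the
-- two header cells, so tree.length + 1 iterations always suffice inside Pre_).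
def altLoop : Nat → List String → List (List String) → List (List String)
  | 0, _, metadata => metadata
  | fuel+1, rest, metadata =>
    if rest = [] then metadata
    else
      match PySem.List.pyGet? rest 0, PySem.List.pyGet? rest 1 with
      | some s0, some s1 =>
        match PySem.Int.ofStr? s0, PySem.Int.ofStr? s1 with
        | some children_count, some metadata_count =>
          let body := PySem.List.slice rest (some 2) none
          if children_count = 0 then
            altLoop fuel (PySem.List.slice body (some metadata_count) none)
              (metadata ++ [PySem.List.slice body none (some metadata_count)])
          else if children_count = 1 then
            altLoop fuel (PySem.List.slice body none (some (-metadata_count)))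
              (metadata ++ [PySem.List.slice body (some (-metadata_count)) none])
          else metadata  -- Source B raises ValueError here; outside Pre_
        | _, _ => metadata  -- int() raises; outside Pre_
      | _, _ => metadata  -- rest[1] raises IndexError; outside Pre_

def process_tree_alt (tree : List String) (metadata : List (List String)) : List (List String) :=
  altLoop (tree.length + 1) tree metadata

-- ===== PRECONDITION & SPEC =====

-- Pre_ admits exactly the inputs on which the Python A returns normally: at every reached node
-- the segment is empty or has at least two cells, both header cells parse as ints, and the
-- children count is 0 or 1 (otherwise A raises IndexError / ValueError / UnboundLocalError).
-- The Nat argument only bounds the recursion (instantiated with the list's length).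
def validAux : Nat → List String → Bool
  | _, [] => true
  | _, [_] => false
  | 0, _ => false  -- never reached: the bound is instantiated with the list's length
  | n+1, a :: b :: data =>
    match PySem.Int.ofStr? a, PySem.Int.ofStr? b with
    | some c, some m =>
      if c = 0 then validAux n (PySem.List.slice data (some m) none)
      else if c = 1 then validAux n (PySem.List.slice data (some 0) (some (-m)))
      else false
    | _, _ => false

def ValidA (l : List String) : Bool := validAux l.length l

def Pre_process_tree (tree : List String) (metadata : List (List String)) : Prop :=
  ValidA tree = true

instance (tree : List String) (metadata : List (List String)) : Decidable (Pre_process_tree tree metadata) := by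
  unfold Pre_process_tree; infer_instance

def pvWitness_process_tree : List String × List (List String) :=
  (["1", "1", "0", "1", "7", "5"], [])

def Spec_process_tree (tree : List String) (metadata : List (List String)) (out : List (List String)) : Prop := out = process_tree_alt tree metadata
instance (tree : List String) (metadata : List (List String)) (out : List (List String)) : Decidable (Spec_process_tree tree metadata out) := by unfold Spec_process_tree; infer_instance

-- ===== CLAIM =====
def Claim_equal_process_tree : Prop := ∀ (tree : List String) (metadata : List (List String)), Dom_process_tree tree metadata → Pre_process_tree tree metadata → Spec_process_tree tree metadata (process_tree tree metadata)

-- ===== LEMMAS AND PROOFS =====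

theorem pv_slice_some_none_len_le (xs : List String) (a : Int) :
    (PySem.List.slice xs (some a) none).length ≤ xs.length := by
  rw [PySem.List.slice_some_none]
  simp

theorem pv_body_eq (a b : String) (data : List String) :
    PySem.List.slice (a :: b :: data) (some 2) none = data := by
  rw [PySem.List.slice_from _ (by norm_num : (0:Int) ≤ 2)]
  rfl

theorem read_header_cons (s0 s1 : String) (d : List String) {c m : Int}
    (hc : PySem.Int.ofStr? s0 = some c) (hm : PySem.Int.ofStr? s1 = some m) :
    read_header (s0 :: s1 :: d) = some (c, m, d) := by
  unfold read_header
  have h0 : PySem.List.pyGet? (s0 :: s1 :: d) 0 = some s0 := by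
    rw [show (0:Int) = ((0:Nat):Int) by norm_num, PySem.List.pyGet?_natCast]; rfl
  have h1 : PySem.List.pyGet? (s0 :: s1 :: d) 1 = some s1 := by
    rw [show (1:Int) = ((1:Nat):Int) by norm_num, PySem.List.pyGet?_natCast]; rfl
  simp only [h0, h1, hc, hm, pv_body_eq]

theorem process_tree_nil (acc : List (List String)) : process_tree [] acc = acc := by
  rw [process_tree]; simp

theorem process_tree_cons (s0 s1 : String) (rest : List String) (acc : List (List String))
    {c m : Int} (hc : PySem.Int.ofStr? s0 = some c) (hm : PySem.Int.ofStr? s1 = some m) :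
    process_tree (s0 :: s1 :: rest) acc
      = (if c = 0 then
           process_tree (PySem.List.slice rest (some m) none)
             (acc ++ [PySem.List.slice rest (some 0) (some m)])
         else if c = 1 then
           process_tree (read_metadata rest m).2 (acc ++ [(read_metadata rest m).1])
         else acc) := by
  rw [process_tree, if_neg (by simp : ¬ (s0 :: s1 :: rest) = []),
    read_header_cons s0 s1 rest hc hm]

theorem validAux_congr (fuel fuel' : Nat) : ∀ (l : List String),
    l.length ≤ fuel → l.length ≤ fuel' → validAux fuel l = validAux fuel' l := by
  induction fuel generalizing fuel' with
  | zero =>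
    intro l h _
    match l with
    | [] => cases fuel' <;> rfl
    | [s] => cases fuel' <;> rfl
    | a :: b :: data => simp at h
  | succ fuel ih =>
    intro l h h'
    match l with
    | [] => cases fuel' <;> rfl
    | [s] => cases fuel' <;> rfl
    | a :: b :: data =>
      simp only [List.length_cons] at h h'
      match fuel', h' with
      | fuel' + 1, h' =>
        rw [validAux, validAux]
        cases PySem.Int.ofStr? a <;> [skip; cases PySem.Int.ofStr? b]
        · rfl
        · rfl
        rename_i c m
        by_cases hc0 : c = 0
        · simp only [if_pos hc0]
          exact ih fuel' _ (le_trans (pv_slice_some_none_len_le data m) (by omega))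
            (le_trans (pv_slice_some_none_len_le data m) (by omega))
        · simp only [if_neg hc0]
          by_cases hc1 : c = 1
          · simp only [if_pos hc1]
            have hl : (PySem.List.slice data (some 0) (some (-m))).length ≤ data.length := by
              rw [PySem.List.slice_zero_start]
              exact pv_slice_none_some_len_le data (-m)
            exact ih fuel' _ (le_trans hl (by omega)) (le_trans hl (by omega))
          · simp [hc1]

theorem validA_cons (s0 s1 : String) (rest : List String) {c m : Int}
    (hc : PySem.Int.ofStr? s0 = some c) (hm : PySem.Int.ofStr? s1 = some m) :
    ValidA (s0 :: s1 :: rest)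
      = (if c = 0 then ValidA (PySem.List.slice rest (some m) none)
         else if c = 1 then ValidA (PySem.List.slice rest (some 0) (some (-m)))
         else false) := by
  show validAux (rest.length + 1 + 1) (s0 :: s1 :: rest) = _
  rw [validAux, hc, hm]
  by_cases hc0 : c = 0
  · simp only [if_pos hc0]
    exact validAux_congr (rest.length + 1) _ _
      (le_trans (pv_slice_some_none_len_le rest m) (by omega)) le_rfl
  · simp only [if_neg hc0]
    by_cases hc1 : c = 1
    · simp only [if_pos hc1]
      have hl : (PySem.List.slice rest (some 0) (some (-m))).length ≤ rest.length := by
        rw [PySem.List.slice_zero_start]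
        exact pv_slice_none_some_len_le rest (-m)
      exact validAux_congr (rest.length + 1) _ _ (le_trans hl (by omega)) le_rfl
    · simp [hc1]

theorem altLoop_eq (fuel : Nat) : ∀ (rest : List String) (acc : List (List String)),
    rest.length < fuel → ValidA rest = true →
    altLoop fuel rest acc = process_tree rest acc := by
  induction fuel with
  | zero => intro rest acc h _; omega
  | succ fuel ih =>
    intro rest acc hlen hv
    match rest with
    | [] => rw [altLoop, if_pos rfl, process_tree_nil]
    | [s] => exact absurd hv (by simp [ValidA, validAux])
    | s0 :: s1 :: data =>
      simp only [List.length_cons] at hlen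
      have hget0 : PySem.List.pyGet? (s0 :: s1 :: data) 0 = some s0 := by
        rw [show (0:Int) = ((0:Nat):Int) by norm_num, PySem.List.pyGet?_natCast]; rfl
      have hget1 : PySem.List.pyGet? (s0 :: s1 :: data) 1 = some s1 := by
        rw [show (1:Int) = ((1:Nat):Int) by norm_num, PySem.List.pyGet?_natCast]; rfl
      obtain ⟨c, hc⟩ : ∃ c, PySem.Int.ofStr? s0 = some c := by
        cases hx : PySem.Int.ofStr? s0
        · rw [show ValidA (s0 :: s1 :: data)
              = validAux (data.length + 1 + 1) (s0 :: s1 :: data) from rfl,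
            validAux, hx] at hv
          simp at hv
        · exact ⟨_, rfl⟩
      obtain ⟨m, hm⟩ : ∃ m, PySem.Int.ofStr? s1 = some m := by
        cases hx : PySem.Int.ofStr? s1
        · rw [show ValidA (s0 :: s1 :: data)
              = validAux (data.length + 1 + 1) (s0 :: s1 :: data) from rfl,
            validAux, hc, hx] at hv
          simp at hv
        · exact ⟨_, rfl⟩
      rw [validA_cons s0 s1 data hc hm] at hv
      rw [altLoop]
      simp only [if_neg (by simp : ¬ (s0 :: s1 :: data) = []), hget0, hget1, hc, hm, pv_body_eq]
      rw [process_tree_cons s0 s1 data acc hc hm]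
      by_cases hc0 : c = 0
      · simp only [if_pos hc0] at hv ⊢
        rw [PySem.List.slice_zero_start]
        exact ih (PySem.List.slice data (some m) none) _
          (by have := pv_slice_some_none_len_le data m; omega) hv
      · simp only [if_neg hc0] at hv ⊢
        have hc1 : c = 1 := by
          by_contra hne
          rw [if_neg hne] at hv
          simp at hv
        simp only [if_pos hc1] at hv ⊢
        unfold read_metadata
        simp only [PySem.List.slice_zero_start] at hv ⊢
        exact ih (PySem.List.slice data none (some (-m))) _
          (by have := pv_slice_none_some_len_le data (-m); omega) hv

-- ===== VERDICT =====
theorem process_tree_spec : Claim_equal_process_tree := by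
  intro tree metadata _ hpre
  unfold Spec_process_tree process_tree_alt
  exact (altLoop_eq (tree.length + 1) tree metadata (by omega) hpre).symm
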